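-- pv_equiv track=rewrite | github.com/lyer1/dfa_sim | dfa_viz_driver.py | generate_node_positions
-- ===== SOURCE A (Python) =====
-- def generate_node_positions(i: int, j: int, lim: int = 0) -> dict:
--
-- 	'''
-- 	returns a dictionary with node(number) as the key and the position they will be at
-- 	in the i x j grid specified in the parameter
-- 	'''
--
-- 	pos, val = {}, 1
-- 	lim = lim if lim else i*j
-- 	for a in range(i):
-- 		# if val == lim: break
-- 		for b in range(j):
-- 			pos[val] = [a, b]
-- 			val += 1
--
-- 	return pos
-- ===== SOURCE B (Python) =====
-- def generate_node_positions(i: int, j: int, lim: int = 0) -> dict: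
--     '''Same mapping as A, computed by index arithmetic instead of nested loops:
--     node val sits at row (val-1)//j, column (val-1)%j.  lim is unused, as in A.'''
--     if i <= 0 or j <= 0:
--         return {}
--     return {val: [(val - 1) // j, (val - 1) % j] for val in range(1, i * j + 1)}
-- ===== Notes on version B (the rewrite author's own statement) =====
-- stated objective: alternative
-- what changed: Replaces the nested row/column loops with a single comprehension over range(1, i*j+1) that computes each cell's coordinates directly as divmod(val-1, j).
import Mathlib
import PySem

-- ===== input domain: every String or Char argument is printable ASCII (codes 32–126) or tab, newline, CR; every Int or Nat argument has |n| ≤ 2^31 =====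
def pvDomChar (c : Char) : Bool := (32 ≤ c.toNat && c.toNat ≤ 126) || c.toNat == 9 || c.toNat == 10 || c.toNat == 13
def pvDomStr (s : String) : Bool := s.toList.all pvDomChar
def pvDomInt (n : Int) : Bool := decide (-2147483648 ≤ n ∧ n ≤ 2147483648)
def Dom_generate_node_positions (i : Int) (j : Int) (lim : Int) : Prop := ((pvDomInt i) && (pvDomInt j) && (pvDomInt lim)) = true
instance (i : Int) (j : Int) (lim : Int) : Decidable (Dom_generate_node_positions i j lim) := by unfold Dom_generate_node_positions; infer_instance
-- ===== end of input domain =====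

-- B replaces A's nested row/column loops by a single pass with divmod index arithmetic (alternative decomposition, same cost).

-- ===== PORT A =====
-- nested loops: for a in range(i): for b in range(j): pos[val] = [a, b]; val += 1
def generate_node_positions (i : Int) (j : Int) (lim : Int) : List (Int × List Int) :=
  let _lim : Int := if lim ≠ 0 then lim else i * j   -- Python: lim = lim if lim else i*j (unused afterwards)
  ((PySem.List.pyRange 0 i 1).foldl
      (fun (st : PySem.Dict Int (List Int) × Int) (a : Int) =>
        (PySem.List.pyRange 0 j 1).foldl
          (fun (st : PySem.Dict Int (List Int) × Int) (b : Int) =>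
            (st.1.insert st.2 [a, b], st.2 + 1)) st)
      (PySem.Dict.empty, 1)).1.items

-- ===== PORT B =====
-- single comprehension over range(1, i*j+1); coordinates via divmod(val-1, j)
def generate_node_positions_alt (i : Int) (j : Int) (lim : Int) : List (Int × List Int) :=
  if i ≤ 0 ∨ j ≤ 0 then []
  else (PySem.List.pyRange 1 (i * j + 1) 1).map
    (fun v => (v, [PySem.Int.floordiv (v - 1) j, PySem.Int.mod (v - 1) j]))

-- ===== PRECONDITION & SPEC =====
def Spec_generate_node_positions (i : Int) (j : Int) (lim : Int) (out : List (Int × List Int)) : Prop := out = generate_node_positions_alt i j lim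
instance (i : Int) (j : Int) (lim : Int) (out : List (Int × List Int)) : Decidable (Spec_generate_node_positions i j lim out) := by unfold Spec_generate_node_positions; infer_instance

-- ===== CLAIM (what is proved, stated in full; the proofs are below) =====
def Claim_equal_generate_node_positions : Prop := ∀ (i : Int) (j : Int) (lim : Int), Dom_generate_node_positions i j lim → Spec_generate_node_positions i j lim (generate_node_positions i j lim)

-- ===== LEMMAS AND PROOFS =====

-- inner row loop: inserting n fresh consecutive keys appends n items and advances the counter by n
lemma gnp_inner (a : Int) (n : Nat) (d : PySem.Dict Int (List Int)) (v : Int)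
    (hfresh : ∀ p ∈ d.items, p.1 < v) :
    (List.range n).foldl
        (fun (st : PySem.Dict Int (List Int) × Int) (k : Nat) =>
          (st.1.insert st.2 [a, 0 + (k : Int)], st.2 + 1)) (d, v)
      = (⟨d.items ++ (List.range n).map (fun (k : Nat) => ((v + (k : Int), [a, (k : Int)]) : Int × List Int))⟩, v + n) := by
  induction n with
  | zero => simp
  | succ n ih =>
      rw [List.range_succ, List.foldl_append, ih]
      simp only [List.foldl_cons, List.foldl_nil]
      have hnc : (PySem.Dict.mk
          (d.items ++ (List.range n).map (fun (k : Nat) => ((v + (k : Int), [a, (k : Int)]) : Int × List Int)))).contains (v + (n : Int)) = false := by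
        simp only [PySem.Dict.contains_mk, List.any_append, Bool.or_eq_false_iff,
          List.any_eq_false]
        constructor
        · intro p hp
          have := hfresh p hp
          simp only [beq_iff_eq]
          omega
        · intro p hp
          simp only [List.mem_map, List.mem_range] at hp
          obtain ⟨k, hk, rfl⟩ := hp
          simp only [beq_iff_eq]
          omega
      simp only [Prod.mk.injEq]
      constructor
      · apply PySem.Dict.ext
        rw [PySem.Dict.items_insert_of_not_contains (h := hnc)]
        simp
      · push_cast; ring

-- outer loop: the full grid, rows appended in order
lemma gnp_outer (n : Nat) (m : Nat) :
    (List.range m).foldl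
        (fun (st : PySem.Dict Int (List Int) × Int) (rr : Nat) =>
          (List.range n).foldl
            (fun (st : PySem.Dict Int (List Int) × Int) (k : Nat) =>
              (st.1.insert st.2 [0 + (rr : Int), 0 + (k : Int)], st.2 + 1)) st)
        (PySem.Dict.empty, 1)
      = (⟨(List.range m).flatMap (fun (rr : Nat) => (List.range n).map
            (fun (k : Nat) => (((1 + (rr : Int) * n + (k : Int)), [(rr : Int), (k : Int)]) : Int × List Int)))⟩,
         1 + (m : Int) * n) := by
  induction m with
  | zero =>
      simp only [List.range_zero, List.foldl_nil, List.flatMap_nil]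
      simp only [Prod.mk.injEq]
      constructor
      · apply PySem.Dict.ext; simp [PySem.Dict.empty]
      · push_cast; ring
  | succ m ih =>
      rw [List.range_succ, List.foldl_append, ih]
      simp only [List.foldl_cons, List.foldl_nil]
      rw [gnp_inner (0 + (m : Int)) n _ (1 + (m : Int) * n) ?_]
      · simp only [Prod.mk.injEq]
        constructor
        · apply PySem.Dict.ext
          simp only [List.flatMap_append, List.flatMap_cons,
            List.flatMap_nil, List.append_nil]
          congr 1
          apply List.map_congr_left
          intro k hk
          simp
        · push_cast; ring
      · intro p hp
        simp only [List.mem_flatMap, List.mem_map, List.mem_range] at hp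
        obtain ⟨rr, hrr, k, hk, rfl⟩ := hp
        have : (rr : Int) * n + n ≤ (m : Int) * n := by
          have : ((rr : Int) + 1) * n ≤ (m : Int) * n := by
            apply mul_le_mul_of_nonneg_right
            · exact_mod_cast hrr
            · positivity
          linarith [this]
        simp only
        omega

-- the grid keys in row order coincide with consecutive numbering decoded by div/mod
lemma gnp_key (n : Nat) (hn : 0 < n) (m : Nat) :
    (List.range m).flatMap (fun (rr : Nat) => (List.range n).map
        (fun (k : Nat) => (((1 + (rr : Int) * n + (k : Int)), [(rr : Int), (k : Int)]) : Int × List Int)))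
      = (List.range (m * n)).map
        (fun (t : Nat) => (((1 + (t : Int)), [((t / n : Nat) : Int), ((t % n : Nat) : Int)]) : Int × List Int)) := by
  induction m with
  | zero => simp
  | succ m ih =>
      rw [List.range_succ, List.flatMap_append, ih, Nat.succ_mul, List.range_add,
        List.map_append, List.map_map]
      congr 1
      simp only [List.flatMap_cons, List.flatMap_nil, List.append_nil]
      apply List.map_congr_left
      intro k hk
      simp only [List.mem_range] at hk
      simp only [Function.comp_apply]
      have h1 : (m * n + k) / n = m := by
        rw [Nat.mul_comm m n, Nat.mul_add_div hn, Nat.div_eq_of_lt hk]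
        omega
      have h2 : (m * n + k) % n = k := by
        rw [Nat.mul_comm m n, Nat.mul_add_mod, Nat.mod_eq_of_lt hk]
      rw [h1, h2]
      simp only [Prod.mk.injEq]
      refine ⟨by push_cast; ring, trivial⟩

lemma pv_foldl_id {α β : Type} (l : List β) (x : α) : l.foldl (fun s _ => s) x = x := by
  induction l generalizing x with
  | nil => rfl
  | cons y ys ih => exact ih x

-- ===== VERDICT (by name: the statement is the Claim_ definition above) =====
theorem generate_node_positions_spec : Claim_equal_generate_node_positions := by
  intro i j lim _
  unfold Spec_generate_node_positions generate_node_positions generate_node_positions_alt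
  by_cases hi : i ≤ 0
  · rw [PySem.List.pyRange_one_eq_nil hi]
    rw [if_pos (Or.inl hi)]
    simp [PySem.Dict.empty]
  · by_cases hj : j ≤ 0
    · simp only [PySem.List.pyRange_one_eq_nil hj, List.foldl_nil]
      rw [pv_foldl_id, if_pos (Or.inr hj)]
      simp [PySem.Dict.empty]
    · push_neg at hi hj
      obtain ⟨m, rfl⟩ : ∃ m : Nat, i = (m : Int) := ⟨i.toNat, (Int.toNat_of_nonneg hi.le).symm⟩
      obtain ⟨n, rfl⟩ : ∃ n : Nat, j = (n : Int) := ⟨j.toNat, (Int.toNat_of_nonneg hj.le).symm⟩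
      have hn0 : 0 < n := by exact_mod_cast hj
      have hcond : ¬((m : Int) ≤ 0 ∨ (n : Int) ≤ 0) := by omega
      rw [if_neg hcond]
      simp only [PySem.List.pyRange_one, List.foldl_map, List.map_map]
      have hmn : ((m : Int) * n + 1 - 1).toNat = m * n := by push_cast; omega
      have hm' : ((m : Int) - 0).toNat = m := by omega
      have hn' : ((n : Int) - 0).toNat = n := by omega
      rw [hmn, hm', hn', gnp_outer n m]
      simp only
      rw [gnp_key n hn0 m]
      apply List.map_congr_left
      intro t ht
      simp only [Function.comp_apply, Prod.mk.injEq]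
      have h1 : (1 : Int) + (t : Int) - 1 = (t : Int) := by ring
      rw [h1, PySem.Int.floordiv_natCast, PySem.Int.mod_natCast]
      exact ⟨trivial, rfl⟩
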